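-- pv_equiv track=rewrite | github.com/mannmalviya/leetcode | contest_prblms/biweekly_contest/week_180/3895_Count_Digit_Appearances.py | without_strings_approach
-- ===== SOURCE A (Python) =====
-- def without_strings_approach(nums: list[int], digit: int) -> int:
--     """
--
--         Time Complexity: O(n) where n is the total number of digits in all numbers in nums
--         Space Complexity: O(1) extra space
--     """
--     def helper(num: int, digit: int) -> int:
--         """
--             - returns the number of times digit shows up in num
--         """
--         count = 0
--         while num > 0:
--             if digit == (num % 10):
--                 count += 1
--             num = num // 10
--
--         return count
--
--     count = 0
--
--     for num in nums:
--         count += helper(num, digit)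
--
--     return count
-- ===== SOURCE B (Python) =====
-- def without_strings_approach(nums: list[int], digit: int) -> int:
--     """String-based recount: for each positive num, count the decimal
--     characters of str(num) equal to digit (per-char int(ch) == digit).
--     Non-positive nums contribute no digits, matching the task."""
--     total = 0
--     for num in nums:
--         if num > 0:
--             for ch in str(num):
--                 if int(ch) == digit:
--                     total += 1
--     return total
-- ===== Notes on version B (the rewrite author's own statement) =====
-- stated objective: idiomatic
-- what changed: Replaces the hand-rolled %10//10 arithmetic digit loop with iterating over the characters of str(num) and counting chars whose int value equals digit (positive nums only, as in A).
import Mathlib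
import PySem

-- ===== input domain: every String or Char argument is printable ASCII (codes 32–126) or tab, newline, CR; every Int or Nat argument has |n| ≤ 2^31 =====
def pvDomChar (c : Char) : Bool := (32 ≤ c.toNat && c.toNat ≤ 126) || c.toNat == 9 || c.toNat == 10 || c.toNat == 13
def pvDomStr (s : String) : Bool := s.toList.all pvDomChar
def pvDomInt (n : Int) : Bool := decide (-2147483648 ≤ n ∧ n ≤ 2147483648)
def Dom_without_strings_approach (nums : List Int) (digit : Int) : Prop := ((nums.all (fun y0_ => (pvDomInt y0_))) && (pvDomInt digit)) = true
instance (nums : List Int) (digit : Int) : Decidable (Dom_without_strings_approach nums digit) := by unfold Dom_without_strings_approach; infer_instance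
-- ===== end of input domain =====

-- B replaces A's %10-//10 arithmetic digit loop by counting characters of str(num);idiomatic, same cost.

-- ===== PORT A =====
-- 'while num > 0: if digit == num % 10: count += 1; num = num // 10' as a tail recursion on (num, count)
def pvHelperLoop (num digit count : Int) : Int :=
  if h : 0 < num then
    pvHelperLoop (PySem.Int.floordiv num 10) digit
      (if digit = PySem.Int.mod num 10 then count + 1 else count)
  else count
termination_by num.toNat
decreasing_by
  rw [PySem.Int.floordiv_eq_ediv_of_pos (by omega : (0:Int) < 10)]
  omega

def without_strings_approach (nums : List Int) (digit : Int) : Int :=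
  nums.foldl (fun count num => count + pvHelperLoop num digit 0) 0

-- ===== PORT B =====
-- inner loop: 'for ch in str(num): if int(ch) == digit: total += 1'
def pvCharCount (num digit : Int) : Int :=
  (PySem.Int.toStr num).toList.foldl
    (fun total c => if PySem.Int.ofChars? [c] = some digit then total + 1 else total) 0

def without_strings_approach_alt (nums : List Int) (digit : Int) : Int :=
  nums.foldl (fun total num => if 0 < num then total + pvCharCount num digit else total) 0

-- ===== PRECONDITION & SPEC =====
def Spec_without_strings_approach (nums : List Int) (digit : Int) (out : Int) : Prop := out = without_strings_approach_alt nums digit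
instance (nums : List Int) (digit : Int) (out : Int) : Decidable (Spec_without_strings_approach nums digit out) := by unfold Spec_without_strings_approach; infer_instance

-- ===== CLAIM (what is proved, stated in full; the proofs are below) =====
def Claim_equal_without_strings_approach : Prop := ∀ (nums : List Int) (digit : Int), Dom_without_strings_approach nums digit → Spec_without_strings_approach nums digit (without_strings_approach nums digit)

-- ===== LEMMAS AND PROOFS =====

-- the reversed decimal digit characters of n, as Nat.toDigits produces them
def pvDigitsRev (n : Nat) : List Char :=
  if h : n < 10 then [Nat.digitChar n]
  else pvDigitsRev (n / 10) ++ [Nat.digitChar (n % 10)]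
termination_by n
decreasing_by omega

lemma pvToDigitsCore_spec : ∀ (fuel n : Nat) (acc : List Char), n < fuel →
    Nat.toDigitsCore 10 fuel n acc = pvDigitsRev n ++ acc := by
  intro fuel
  induction fuel with
  | zero => intro n acc h; omega
  | succ f ih =>
    intro n acc h
    by_cases h10 : n < 10
    · have hz : n / 10 = 0 := by omega
      simp [Nat.toDigitsCore, hz, pvDigitsRev, h10,
        Nat.mod_eq_of_lt h10]
    · have hz : ¬ n / 10 = 0 := by omega
      rw [show Nat.toDigitsCore 10 (f+1) n acc
            = Nat.toDigitsCore 10 f (n / 10) (Nat.digitChar (n % 10) :: acc) by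
          simp [Nat.toDigitsCore, hz]]
      rw [ih (n / 10) _ (by omega)]
      rw [show pvDigitsRev n = pvDigitsRev (n / 10) ++ [Nat.digitChar (n % 10)] from by
        rw [pvDigitsRev]; simp [h10]]
      simp

lemma pvOfChars_digitChar_val (d : Nat) (hd : d < 10) :
    PySem.Int.ofChars? [Nat.digitChar d] = some (d : Int) := by
  interval_cases d <;> rfl

lemma pvOfChars_digitChar (d : Nat) (hd : d < 10) (digit : Int) :
    (PySem.Int.ofChars? [Nat.digitChar d] = some digit) ↔ digit = (d : Int) := by
  rw [pvOfChars_digitChar_val d hd]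
  simp [eq_comm]

-- A's inner loop equals c plus the digit count of pvDigitsRev
lemma pvHelperLoop_eq (digit : Int) : ∀ (n : Nat), 0 < n → ∀ (c : Int),
    pvHelperLoop (n : Int) digit c
      = c + ((pvDigitsRev n).countP
              (fun ch => PySem.Int.ofChars? [ch] = some digit) : Int) := by
  intro n
  induction n using Nat.strong_induction_on with
  | _ n ih =>
    intro hn c
    rw [pvHelperLoop, dif_pos (by exact_mod_cast hn : (0:Int) < (n : Int))]
    rw [PySem.Int.floordiv_eq_ediv_of_pos (by omega : (0:Int) < 10),
      PySem.Int.mod_eq_emod_of_pos (by omega : (0:Int) < 10)]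
    have e1 : (n : Int) / 10 = ((n / 10 : Nat) : Int) := by omega
    have e2 : (n : Int) % 10 = ((n % 10 : Nat) : Int) := by omega
    rw [e1, e2]
    by_cases h10 : n < 10
    · have hz : n / 10 = 0 := by omega
      rw [hz]
      rw [pvHelperLoop]
      simp only [show ¬ (0:Int) < ((0:Nat):Int) by simp, dif_neg, not_false_iff]
      rw [pvDigitsRev]
      simp only [h10, dif_pos, List.countP_cons, List.countP_nil]
      rw [Nat.mod_eq_of_lt h10]
      by_cases hq : digit = (n : Int)
      · simp [hq, pvOfChars_digitChar_val n h10]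
      · have hne : ¬ (PySem.Int.ofChars? [Nat.digitChar n] = some digit) := by
          intro h; exact hq ((pvOfChars_digitChar n h10 digit).1 h)
        simp [hq, hne]
    · have hpos : 0 < n / 10 := by omega
      rw [ih (n / 10) (by omega) hpos]
      rw [show pvDigitsRev n = pvDigitsRev (n / 10) ++ [Nat.digitChar (n % 10)] from by
        rw [pvDigitsRev]; simp [h10]]
      simp only [List.countP_append, List.countP_cons, List.countP_nil]
      have hmod : n % 10 < 10 := by omega
      by_cases hq : digit = ((n % 10 : Nat) : Int)
      · rw [if_pos hq]
        simp [pvOfChars_digitChar_val _ hmod]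
        rw [e2, if_pos hq.symm]
        ring
      · have hne : ¬ (PySem.Int.ofChars? [Nat.digitChar (n % 10)] = some digit) := by
          intro h; exact hq ((pvOfChars_digitChar _ hmod digit).1 h)
        rw [if_neg hq]
        simp [hne]

-- B's inner loop is the same count, for positive num
lemma pvCharCount_eq (n : Nat) (hn : 0 < n) (digit : Int) :
    pvCharCount (n : Int) digit
      = ((pvDigitsRev n).countP
          (fun ch => PySem.Int.ofChars? [ch] = some digit) : Int) := by
  unfold pvCharCount
  rw [PySem.Int.toList_toStr]
  have hchars : PySem.Int.toChars (n : Int) = pvDigitsRev n := by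
    unfold PySem.Int.toChars
    rw [if_neg (by omega)]
    simp only [Int.toNat_natCast]
    rw [show Nat.toDigits 10 n = Nat.toDigitsCore 10 (n+1) n [] from rfl]
    rw [pvToDigitsCore_spec (n+1) n [] (by omega)]
    simp
  rw [hchars]
  simpa using PySem.List.foldl_count_if
    (fun ch => decide (PySem.Int.ofChars? [ch] = some digit)) (pvDigitsRev n) 0

-- per-number agreement, every Int
lemma pvPerNum (num digit : Int) :
    pvHelperLoop num digit 0
      = if 0 < num then pvCharCount num digit else 0 := by
  by_cases h : 0 < num
  · rw [if_pos h]
    have hn : num = ((num.toNat : Nat) : Int) := by omega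
    rw [hn, pvHelperLoop_eq digit num.toNat (by omega) 0,
      pvCharCount_eq num.toNat (by omega) digit]
    ring
  · rw [if_neg h, pvHelperLoop]
    simp [h]

lemma pvFoldl (digit : Int) : ∀ (nums : List Int) (acc : Int),
    nums.foldl (fun count num => count + pvHelperLoop num digit 0) acc
      = nums.foldl (fun total num => if 0 < num then total + pvCharCount num digit else total) acc := by
  intro nums
  induction nums with
  | nil => intro acc; rfl
  | cons x xs ih =>
    intro acc
    simp only [List.foldl_cons]
    rw [pvPerNum x digit, ih]
    by_cases h : 0 < x <;> simp [h]

-- ===== VERDICT (by name: the statement is the Claim_ definition above) =====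
theorem without_strings_approach_spec : Claim_equal_without_strings_approach := by
  intro nums digit _
  unfold Spec_without_strings_approach without_strings_approach without_strings_approach_alt
  exact pvFoldl digit nums 0
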